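-- pv_equiv track=rewrite | github.com/pratnik/fo_trading_system | app/strategies/iron_condor.py | validate_iron_condor_structure
-- ===== SOURCE A (Python) =====
-- from typing import Dict, List, Any
--
-- def validate_iron_condor_structure(orders: List[Dict[str, Any]]) -> bool:
--     """Validate that orders represent proper Iron Condor structure"""
--     if len(orders) != 4:
--         return False
--
--     # Should have 2 calls and 2 puts
--     calls = [o for o in orders if o.get("option_type") == "CE"]
--     puts = [o for o in orders if o.get("option_type") == "PE"]
--
--     if len(calls) != 2 or len(puts) != 2:
--         return False
--
--     # Should have one short and one long for each type
--     call_sides = [o.get("side") for o in calls]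
--     put_sides = [o.get("side") for o in puts]
--
--     return ("BUY" in call_sides and "SELL" in call_sides and
--             "BUY" in put_sides and "SELL" in put_sides)
-- ===== SOURCE B (Python) =====
-- def validate_iron_condor_structure(orders):
--     """Validate that orders represent proper Iron Condor structure"""
--     actual = {(o.get("option_type"), o.get("side")) for o in orders}
--     return len(orders) == 4 and actual == {
--         ("CE", "BUY"), ("CE", "SELL"), ("PE", "BUY"), ("PE", "SELL")
--     }
-- ===== Notes on version B (the rewrite author's own statement) =====
-- stated objective: simpler
-- what changed: Replaced the two filter passes, the length checks and the four membership tests with one pass building a set of (option_type, side) pairs and a single set equality against the four required legs (with the len==4 guard).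
import Mathlib
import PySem

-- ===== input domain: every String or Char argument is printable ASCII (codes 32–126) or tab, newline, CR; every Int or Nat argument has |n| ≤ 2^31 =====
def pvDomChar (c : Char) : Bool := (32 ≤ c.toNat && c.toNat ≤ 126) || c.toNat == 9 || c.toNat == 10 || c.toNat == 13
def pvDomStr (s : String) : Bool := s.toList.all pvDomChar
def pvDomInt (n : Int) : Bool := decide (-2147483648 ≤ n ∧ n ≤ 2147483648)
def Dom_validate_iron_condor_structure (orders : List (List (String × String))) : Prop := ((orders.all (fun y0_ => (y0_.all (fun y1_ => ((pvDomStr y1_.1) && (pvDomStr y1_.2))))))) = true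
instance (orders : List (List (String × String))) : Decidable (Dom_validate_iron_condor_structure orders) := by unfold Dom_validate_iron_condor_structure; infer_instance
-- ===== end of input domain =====

-- B replaces A's two filter passes plus four membership tests by one pass building the
-- set of (option_type, side) pairs and a single set equality (objective: simpler).

-- ===== PORT A =====
def validate_iron_condor_structure (orders : List (List (String × String))) : Bool :=
  if orders.length ≠ 4 then false
  else
    let calls := orders.filter (fun o => PySem.Dict.get? (PySem.Dict.mk o) "option_type" == some "CE")
    let puts  := orders.filter (fun o => PySem.Dict.get? (PySem.Dict.mk o) "option_type" == some "PE")
    if calls.length ≠ 2 ∨ puts.length ≠ 2 then false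
    else
      let call_sides := calls.map (fun o => PySem.Dict.get? (PySem.Dict.mk o) "side")
      let put_sides  := puts.map (fun o => PySem.Dict.get? (PySem.Dict.mk o) "side")
      (call_sides.contains (some "BUY") && call_sides.contains (some "SELL") &&
       put_sides.contains (some "BUY") && put_sides.contains (some "SELL"))

-- ===== PORT B =====
-- the literal set {("CE","BUY"),("CE","SELL"),("PE","BUY"),("PE","SELL")} (values are o.get results, hence Option)
def icTarget : PySem.Set (Option String × Option String) :=
  PySem.Set.ofList [(some "CE", some "BUY"), (some "CE", some "SELL"),
                    (some "PE", some "BUY"), (some "PE", some "SELL")]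

def validate_iron_condor_structure_alt (orders : List (List (String × String))) : Bool :=
  let actual : PySem.Set (Option String × Option String) :=
    PySem.Set.ofList (orders.map (fun o => (PySem.Dict.get? (PySem.Dict.mk o) "option_type", PySem.Dict.get? (PySem.Dict.mk o) "side")))
  (orders.length == 4) && PySem.Set.equal actual icTarget

-- ===== PRECONDITION & SPEC =====
def Spec_validate_iron_condor_structure (orders : List (List (String × String))) (out : Bool) : Prop := out = validate_iron_condor_structure_alt orders
instance (orders : List (List (String × String))) (out : Bool) : Decidable (Spec_validate_iron_condor_structure orders out) := by unfold Spec_validate_iron_condor_structure; infer_instance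

-- ===== CLAIM (what is proved, stated in full; the proofs are below) =====
def Claim_equal_validate_iron_condor_structure : Prop := ∀ (orders : List (List (String × String))), Dom_validate_iron_condor_structure orders → Spec_validate_iron_condor_structure orders (validate_iron_condor_structure orders)

-- ===== LEMMAS AND PROOFS =====

-- Abstraction: only the comparisons against the literals "CE"/"PE"/"BUY"/"SELL" matter,
-- so classify every (option_type, side) pair into a 3-valued tag pair and decide the
-- core equivalence over the finitely many tag quadruples.
inductive ICTag | t0 | t1 | t2
deriving DecidableEq, Repr

def tagT (t : Option String) : ICTag := if t == some "CE" then .t0 else if t == some "PE" then .t1 else .t2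
def tagS (s : Option String) : ICTag := if s == some "BUY" then .t0 else if s == some "SELL" then .t1 else .t2
def icPair (o : List (String × String)) : Option String × Option String :=
  (PySem.Dict.get? (PySem.Dict.mk o) "option_type", PySem.Dict.get? (PySem.Dict.mk o) "side")
def icKappa (x : Option String × Option String) : ICTag × ICTag := (tagT x.1, tagS x.2)

def icTargetK : List (ICTag × ICTag) := [(.t0,.t0),(.t0,.t1),(.t1,.t0),(.t1,.t1)]

def gA (ks : List (ICTag × ICTag)) : Bool :=
  if ks.length ≠ 4 then false
  else
    let calls := ks.filter (fun k => k.1 == .t0)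
    let puts  := ks.filter (fun k => k.1 == .t1)
    if calls.length ≠ 2 ∨ puts.length ≠ 2 then false
    else
      ((calls.map Prod.snd).contains .t0 && (calls.map Prod.snd).contains .t1 &&
       (puts.map Prod.snd).contains .t0 && (puts.map Prod.snd).contains .t1)

def gB (ks : List (ICTag × ICTag)) : Bool :=
  (ks.length == 4) && decide ((∀ k ∈ ks, k ∈ icTargetK) ∧ (∀ k ∈ icTargetK, k ∈ ks))

theorem tagT_eq_t0_iff (t : Option String) : tagT t = .t0 ↔ t = some "CE" := by
  simp only [tagT]; split_ifs with h1 h2 <;> simp_all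
theorem tagT_eq_t1_iff (t : Option String) : tagT t = .t1 ↔ t = some "PE" := by
  simp only [tagT]; split_ifs with h1 h2 <;> simp_all
theorem tagS_eq_t0_iff (s : Option String) : tagS s = .t0 ↔ s = some "BUY" := by
  simp only [tagS]; split_ifs with h1 h2 <;> simp_all
theorem tagS_eq_t1_iff (s : Option String) : tagS s = .t1 ↔ s = some "SELL" := by
  simp only [tagS]; split_ifs with h1 h2 <;> simp_all

theorem icKappa_eq_00 (x : Option String × Option String) :
    icKappa x = (.t0, .t0) ↔ x = (some "CE", some "BUY") := by
  cases x; simp [icKappa, Prod.ext_iff, tagT_eq_t0_iff, tagS_eq_t0_iff]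
theorem icKappa_eq_01 (x : Option String × Option String) :
    icKappa x = (.t0, .t1) ↔ x = (some "CE", some "SELL") := by
  cases x; simp [icKappa, Prod.ext_iff, tagT_eq_t0_iff, tagS_eq_t1_iff]
theorem icKappa_eq_10 (x : Option String × Option String) :
    icKappa x = (.t1, .t0) ↔ x = (some "PE", some "BUY") := by
  cases x; simp [icKappa, Prod.ext_iff, tagT_eq_t1_iff, tagS_eq_t0_iff]
theorem icKappa_eq_11 (x : Option String × Option String) :
    icKappa x = (.t1, .t1) ↔ x = (some "PE", some "SELL") := by
  cases x; simp [icKappa, Prod.ext_iff, tagT_eq_t1_iff, tagS_eq_t1_iff]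

theorem mem_icTarget_iff (x : Option String × Option String) :
    x ∈ (icTarget : List (Option String × Option String)) ↔ icKappa x ∈ icTargetK := by
  simp [icTarget, icTargetK, PySem.Set.mem_ofList, icKappa_eq_00, icKappa_eq_01, icKappa_eq_10, icKappa_eq_11]

-- A's port computed through the abstraction
theorem A_eq_gA (orders : List (List (String × String))) :
    validate_iron_condor_structure orders = gA (orders.map (fun o => icKappa (icPair o))) := by
  have hfc : ∀ o : List (String × String),
      ((icKappa (icPair o)).1 == ICTag.t0) = (PySem.Dict.get? (PySem.Dict.mk o) "option_type" == some "CE") := by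
    intro o; simp [icKappa, icPair, tagT_eq_t0_iff]
  have hfp : ∀ o : List (String × String),
      ((icKappa (icPair o)).1 == ICTag.t1) = (PySem.Dict.get? (PySem.Dict.mk o) "option_type" == some "PE") := by
    intro o; simp [icKappa, icPair, tagT_eq_t1_iff]
  have hside : ∀ (l : List (List (String × String))) (v : String) (j : ICTag),
      (∀ s : Option String, tagS s = j ↔ s = some v) →
      (List.map (fun o => PySem.Dict.get? (PySem.Dict.mk o) "side") l).contains (some v) =
      (List.map (fun x => (icKappa (icPair x)).2) l).contains j := by
    intro l v j hj
    rw [Bool.eq_iff_iff, List.contains_iff_mem, List.contains_iff_mem]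
    simp only [List.mem_map]
    exact exists_congr fun o => and_congr_right fun _ => by
      simp [icKappa, icPair, hj, eq_comm]
  simp only [validate_iron_condor_structure, gA, List.length_map, List.filter_map,
    Function.comp_def, hfc, hfp, List.map_map]
  split_ifs with h1 h2 <;> try rfl
  rw [hside _ "BUY" .t0 tagS_eq_t0_iff, hside _ "SELL" .t1 tagS_eq_t1_iff,
      hside _ "BUY" .t0 tagS_eq_t0_iff, hside _ "SELL" .t1 tagS_eq_t1_iff]

-- B's port computed through the abstraction
theorem B_eq_gB (orders : List (List (String × String))) :
    validate_iron_condor_structure_alt orders = gB (orders.map (fun o => icKappa (icPair o))) := by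
  simp only [validate_iron_condor_structure_alt, gB, List.length_map]
  congr 1
  rw [Bool.eq_iff_iff, PySem.Set.equal_iff, decide_eq_true_iff]
  constructor
  · intro h
    constructor
    · intro k hk
      obtain ⟨o, ho, rfl⟩ := List.mem_map.1 hk
      rw [← mem_icTarget_iff]
      exact (h (icPair o)).1 (by
        simp only [PySem.Set.mem_ofList, List.mem_map]
        exact ⟨o, ho, rfl⟩)
    · intro k hk
      simp only [icTargetK, List.mem_cons, List.not_mem_nil, or_false] at hk
      have grab : ∀ x : Option String × Option String,
          x ∈ (icTarget : List (Option String × Option String)) →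
          icKappa x ∈ orders.map (fun o => icKappa (icPair o)) := by
        intro x hxT
        have hx : x ∈ orders.map (fun o => (PySem.Dict.get? (PySem.Dict.mk o) "option_type", PySem.Dict.get? (PySem.Dict.mk o) "side")) := by
          simpa only [PySem.Set.mem_ofList] using (h x).2 hxT
        obtain ⟨o, ho, heq⟩ := List.mem_map.1 hx
        have heq' : icPair o = x := heq
        exact List.mem_map.2 ⟨o, ho, by rw [heq']⟩
      rcases hk with rfl | rfl | rfl | rfl
      · exact grab (some "CE", some "BUY") (by decide)
      · exact grab (some "CE", some "SELL") (by decide)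
      · exact grab (some "PE", some "BUY") (by decide)
      · exact grab (some "PE", some "SELL") (by decide)
  · rintro ⟨h1, h2⟩ x
    constructor
    · intro hx
      simp only [PySem.Set.mem_ofList] at hx
      obtain ⟨o, ho, rfl⟩ := List.mem_map.1 hx
      rw [mem_icTarget_iff]
      exact h1 _ (List.mem_map.2 ⟨o, ho, rfl⟩)
    · intro hx
      have hk : icKappa x ∈ icTargetK := (mem_icTarget_iff x).1 hx
      obtain ⟨o, ho, hko⟩ := List.mem_map.1 (h2 _ hk)
      have heq : icPair o = x := by
        simp only [icTargetK, List.mem_cons, List.not_mem_nil, or_false] at hk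
        rcases hk with hk0 | hk0 | hk0 | hk0 <;>
          rw [hk0] at hko <;>
          first
            | exact ((icKappa_eq_00 _).1 hko).trans ((icKappa_eq_00 x).1 hk0).symm
            | exact ((icKappa_eq_01 _).1 hko).trans ((icKappa_eq_01 x).1 hk0).symm
            | exact ((icKappa_eq_10 _).1 hko).trans ((icKappa_eq_10 x).1 hk0).symm
            | exact ((icKappa_eq_11 _).1 hko).trans ((icKappa_eq_11 x).1 hk0).symm
      rw [← heq]
      simp only [PySem.Set.mem_ofList, List.mem_map]
      exact ⟨o, ho, rfl⟩

def icAll : List (ICTag × ICTag) :=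
  [(.t0,.t0),(.t0,.t1),(.t0,.t2),(.t1,.t0),(.t1,.t1),(.t1,.t2),(.t2,.t0),(.t2,.t1),(.t2,.t2)]

theorem icAll_complete : ∀ k : ICTag × ICTag, k ∈ icAll := by
  rintro ⟨a, b⟩; cases a <;> cases b <;> decide

set_option maxHeartbeats 1000000 in
theorem gA_eq_gB4 : ∀ a ∈ icAll, ∀ b ∈ icAll, ∀ c ∈ icAll, ∀ d ∈ icAll,
    gA [a,b,c,d] = gB [a,b,c,d] := by decide

theorem gA_eq_gB (ks : List (ICTag × ICTag)) : gA ks = gB ks := by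
  rcases ks with _ | ⟨a, _ | ⟨b, _ | ⟨c, _ | ⟨d, _ | ⟨e, tl⟩⟩⟩⟩⟩
  · rfl
  · rfl
  · rfl
  · rfl
  · exact gA_eq_gB4 a (icAll_complete a) b (icAll_complete b) c (icAll_complete c) d (icAll_complete d)
  · simp [gA, gB]; try omega

-- ===== VERDICT (by name: the statement is the Claim_ definition above) =====
theorem validate_iron_condor_structure_spec : Claim_equal_validate_iron_condor_structure := by
  intro orders _
  unfold Spec_validate_iron_condor_structure
  rw [A_eq_gA, B_eq_gB, gA_eq_gB]
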